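-- pv_equiv track=rewrite | github.com/duartegroup/autodE | autode/smiles/parser.py | atomic_n_hydrogens
-- ===== SOURCE A (Python) =====
-- def atomic_n_hydrogens(string):
--     """
--     Extract the number of hydrogens from a partial SMILES, i.e.
--
--     H3-  ->  3
--     H    ->  1
--     C    ->  0
--
--     Arguments:
--         string (str):
--
--     Returns:
--         (int): Number of hydrogens
--     """
--     for i, item in enumerate(string):
--
--         if item == 'H':
--             # e.g. [CH3]  where rest = H3  or [OH-]
--             if next_char(string, i).isdigit():
--                 return int(string[i + 1])
--
--             # e.g. [OH]
--             else:
--                 return 1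
--
--     return 0
--
-- def next_char(string, idx):
--     """
--     Get the next character in a string if it exists otherwise return
--     an empty string
--
--     Arguments:
--         string (str):
--         idx (idx): Index of the current position in the string
--
--     Returns:
--         (str):
--     """
--     if idx >= len(string) - 1:
--         return ''
--
--     return string[idx + 1]
-- ===== SOURCE B (Python) =====
-- def atomic_n_hydrogens(string):
--     """Number of hydrogens in a partial SMILES, computed by a single
--     right-to-left pass carrying the previously seen (i.e. following)
--     character; the leftmost 'H' overwrites any later answer."""
--     result = 0
--     follower = ''
--     for ch in reversed(string):
--         if ch == 'H':
--             result = int(follower) if follower.isdigit() else 1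
--         follower = ch
--     return result
-- ===== Notes on version B (the rewrite author's own statement) =====
-- stated objective: alternative
-- what changed: Replaces the forward scan with early return and a next_char index lookahead by a single right-to-left pass with an accumulator that carries the following character, so no index arithmetic or lookahead is needed and the leftmost H's value simply overwrites later ones.
import Mathlib
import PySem

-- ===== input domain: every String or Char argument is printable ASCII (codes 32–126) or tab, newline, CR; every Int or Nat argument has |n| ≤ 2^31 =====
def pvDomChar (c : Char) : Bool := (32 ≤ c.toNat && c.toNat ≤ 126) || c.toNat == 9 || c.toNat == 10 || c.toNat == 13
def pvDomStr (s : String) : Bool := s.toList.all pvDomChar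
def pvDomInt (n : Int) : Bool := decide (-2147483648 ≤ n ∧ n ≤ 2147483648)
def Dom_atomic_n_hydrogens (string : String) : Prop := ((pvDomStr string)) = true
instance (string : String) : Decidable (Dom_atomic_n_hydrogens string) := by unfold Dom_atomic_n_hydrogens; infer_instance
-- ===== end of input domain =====

-- B replaces A's forward scan with early return and next_char index lookahead by one
-- right-to-left pass carrying the following character in an accumulator (alternative; same cost).

-- ===== PORT A =====
-- next_char: '' if idx is the last (or past-the-end) index, else string[idx+1], as a 0/1-char List Char
def pvNextChar (s : List Char) (idx : Int) : List Char :=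
  if idx ≥ (s.length : Int) - 1 then []
  else match PySem.List.pyGet? s (idx + 1) with
       | some c => [c]
       | none => []   -- unreachable: idx+1 is in range under the guard

-- the for-loop over enumerate(string); early return becomes the match result
def pvLoopA (s : List Char) : List (Int × Char) → Int
  | [] => 0
  | (i, item) :: rest =>
    if item = 'H' then
      if PySem.Chars.strIsdigit (pvNextChar s i) then
        -- int(string[i+1]); the guard guarantees a digit, so ofChars? is some
        (PySem.Int.ofChars? (match PySem.List.pyGet? s (i + 1) with
                             | some c => [c]
                             | none => [])).getD 0
      else 1
    else pvLoopA s rest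

def atomic_n_hydrogens (string : String) : Int :=
  pvLoopA string.toList (PySem.List.enumerate string.toList 0)

-- ===== PORT B =====
-- loop body: state = (result, follower); follower is '' or one char, kept as a List Char
def pvAltStep (acc : Int × List Char) (ch : Char) : Int × List Char :=
  ((if ch = 'H' then
      (if PySem.Chars.strIsdigit acc.2 then (PySem.Int.ofChars? acc.2).getD 0 else 1)
    else acc.1), [ch])

def atomic_n_hydrogens_alt (string : String) : Int :=
  (string.toList.reverse.foldl pvAltStep (0, [])).1

-- ===== PRECONDITION & SPEC =====
def Spec_atomic_n_hydrogens (string : String) (out : Int) : Prop := out = atomic_n_hydrogens_alt string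
instance (string : String) (out : Int) : Decidable (Spec_atomic_n_hydrogens string out) := by unfold Spec_atomic_n_hydrogens; infer_instance

-- ===== CLAIM (what is proved, stated in full; the proofs are below) =====
def Claim_equal_atomic_n_hydrogens : Prop := ∀ (string : String), Dom_atomic_n_hydrogens string → Spec_atomic_n_hydrogens string (atomic_n_hydrogens string)

-- ===== LEMMAS AND PROOFS =====

-- common characterisation: first-H semantics on a list of characters
def hSpec : List Char → Int
  | [] => 0
  | c :: t =>
    if c = 'H' then
      if PySem.Chars.strIsdigit (t.take 1) then (PySem.Int.ofChars? (t.take 1)).getD 0 else 1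
    else hSpec t

-- A's loop on the suffix `rest` of the full string `pre ++ rest` computes hSpec rest
theorem loopA_eq_hSpec (rest pre : List Char) :
    pvLoopA (pre ++ rest) (PySem.List.enumerate rest (pre.length : Int)) = hSpec rest := by
  induction rest generalizing pre with
  | nil => rfl
  | cons c t ih =>
    rw [PySem.List.enumerate_cons]
    show pvLoopA (pre ++ c :: t) _ = _
    by_cases hc : c = 'H'
    · subst hc
      have hget : PySem.List.pyGet? (pre ++ 'H' :: t) ((pre.length : Int) + 1) = t[0]? := by
        have h1 : ((pre.length : Int) + 1) = ((pre.length + 1 : Nat) : Int) := by push_cast; ring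
        rw [h1, PySem.List.pyGet?_natCast]
        simp [List.getElem?_append_right]
      have hnext : pvNextChar (pre ++ 'H' :: t) (pre.length : Int) = t.take 1 := by
        unfold pvNextChar
        cases t with
        | nil => rw [if_pos (by simp)]; rfl
        | cons d t' => rw [if_neg (by simp), hget]; simp
      have htake : (match t[0]? with | some d => [d] | none => ([] : List Char)) = t.take 1 := by
        cases t <;> simp
      simp [pvLoopA, hSpec, hnext, hget, htake]
    · have h1 : (pre.length : Int) + 1 = ((pre ++ [c]).length : Int) := by
        simp
      simp only [pvLoopA, if_neg hc, hSpec, h1]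
      have h2 : pre ++ c :: t = (pre ++ [c]) ++ t := by simp
      rw [h2]
      exact ih (pre ++ [c])

-- B's reverse fold returns (hSpec s, first char of s)
theorem foldB_eq_hSpec (s : List Char) :
    s.reverse.foldl pvAltStep (0, []) = (hSpec s, s.take 1) := by
  induction s with
  | nil => rfl
  | cons c t ih =>
    rw [List.reverse_cons, List.foldl_append, ih]
    cases t <;> simp [pvAltStep, hSpec]

-- ===== VERDICT (by name: the statement is the Claim_ definition above) =====
theorem atomic_n_hydrogens_spec : Claim_equal_atomic_n_hydrogens := by
  intro string _
  unfold Spec_atomic_n_hydrogens atomic_n_hydrogens atomic_n_hydrogens_alt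
  rw [foldB_eq_hSpec]
  have := loopA_eq_hSpec string.toList []
  simpa using this
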